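-- pv_equiv track=rewrite | github.com/S0jer/algorithms-and-data-structures-course-2021 | Sortowania/RadixSort.py | f_max
-- ===== SOURCE A (Python) =====
-- def f_max(T):
--     i_max, d = 0, 0
--     for i in T:
--         if i > i_max:
--             i_max = i
--     while i_max != 0:
--         i_max //= 10
--         d += 1
--     return d
-- ===== SOURCE B (Python) =====
-- def f_max(T):
--     m = max(T, default=0)
--     return len(str(m)) if m > 0 else 0
-- ===== Notes on version B (the rewrite author's own statement) =====
-- stated objective: idiomatic
-- what changed: B replaces A's manual running-max scan and repeated floor-division digit loop with the builtin max(T, default=0) and a single len(str(m)) string-length computation (guarded by m > 0 so a nonpositive maximum yields 0 as in A), eliminating the digit-extraction loop entirely.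
import Mathlib
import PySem

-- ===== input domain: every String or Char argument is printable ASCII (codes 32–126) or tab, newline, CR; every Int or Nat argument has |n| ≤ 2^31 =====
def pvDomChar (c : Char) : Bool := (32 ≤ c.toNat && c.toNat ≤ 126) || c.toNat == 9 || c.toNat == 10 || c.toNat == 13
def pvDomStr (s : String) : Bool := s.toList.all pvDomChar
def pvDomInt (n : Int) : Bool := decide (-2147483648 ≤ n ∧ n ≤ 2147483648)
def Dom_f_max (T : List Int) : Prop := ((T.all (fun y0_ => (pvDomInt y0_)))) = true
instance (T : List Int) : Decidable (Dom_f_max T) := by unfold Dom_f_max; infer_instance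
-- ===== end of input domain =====

-- B replaces A's manual running-max scan and digit-extraction division loop with the builtin
-- max (default 0) and the length of str(m) for a positive maximum (idiomatic; same cost).


-- ===== PORT A =====
-- A's while loop: i_max is seeded at 0 and only ever raised, so it is always ≥ 0; the loop is
-- ported on Nat, where Nat division coincides with Python's floor division (exact here).
def f_maxDigitLoop (m : Nat) (d : Int) : Int :=
  if m ≠ 0 then f_maxDigitLoop (m / 10) (d + 1) else d
termination_by m
decreasing_by exact Nat.div_lt_self (Nat.pos_of_ne_zero (by assumption)) (by norm_num)

def f_max (T : List Int) : Int :=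
  let i_max := T.foldl (fun i_max i => if i > i_max then i else i_max) 0
  f_maxDigitLoop i_max.toNat 0

-- ===== PORT B =====
def f_max_alt (T : List Int) : Int :=
  let m := PySem.List.maxD T (fun x => x) 0
  if m > 0 then PySem.Str.len (PySem.Int.toStr m) else 0

-- ===== PRECONDITION & SPEC =====
def Spec_f_max (T : List Int) (out : Int) : Prop := out = f_max_alt T
instance (T : List Int) (out : Int) : Decidable (Spec_f_max T out) := by unfold Spec_f_max; infer_instance

-- ===== CLAIM (what is proved, stated in full; the proofs are below) =====
def Claim_equal_f_max : Prop := ∀ (T : List Int), Dom_f_max T → Spec_f_max T (f_max T)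

-- ===== LEMMAS AND PROOFS =====

-- A's running-max body is `max`.
theorem f_max_fold_is_max (T : List Int) :
    T.foldl (fun i_max i => if i > i_max then i else i_max) 0 = T.foldl max 0 := by
  have hf : (fun (i_max i : Int) => if i > i_max then i else i_max) = max := by
    funext a b
    simp only [max_def]
    split_ifs <;> omega
  rw [hf]

theorem foldl_max_pull (t : List Int) : ∀ a b : Int,
    t.foldl max (max a b) = max a (t.foldl max b) := by
  induction t with
  | nil => intro a b; rfl
  | cons x t ih =>
    intro a b
    simp only [List.foldl_cons, max_assoc, ih]

theorem digitLoop_zero (d : Int) : f_maxDigitLoop 0 d = d := by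
  rw [f_maxDigitLoop]; simp

theorem digitLoop_pos (n : Nat) : ∀ d : Int, 0 < n →
    f_maxDigitLoop n d = d + (Nat.log 10 n : Int) + 1 := by
  induction n using Nat.strong_induction_on with
  | _ n ih =>
    intro d hn
    rw [f_maxDigitLoop]
    rw [if_pos (Nat.pos_iff_ne_zero.mp hn)]
    by_cases h10 : n < 10
    · rw [Nat.div_eq_of_lt h10, digitLoop_zero, Nat.log_eq_zero_iff.mpr (Or.inl h10)]
      omega
    · push_neg at h10
      have hdiv : n / 10 < n := Nat.div_lt_self hn (by norm_num)
      have hdivpos : 0 < n / 10 := Nat.div_pos h10 (by norm_num)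
      rw [ih (n / 10) hdiv (d + 1) hdivpos]
      have hlog : Nat.log 10 (n / 10) = Nat.log 10 n - 1 := Nat.log_div_base 10 n
      have hlogpos : 0 < Nat.log 10 n := Nat.log_pos (by norm_num) h10
      omega

-- Exact length of core's decimal rendering: len(str(n)) = log₁₀ n + 1 digits for 0 < n.
theorem toDigitsCore_len_exact (f : Nat) : ∀ (n : Nat) (ds : List Char), n < f →
    (Nat.toDigitsCore 10 f n ds).length = Nat.log 10 n + 1 + ds.length := by
  induction f with
  | zero => intro n ds h; omega
  | succ f ih =>
    intro n ds h
    show (Nat.toDigitsCore 10 (f + 1) n ds).length = _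
    rw [Nat.toDigitsCore]
    by_cases h10 : n < 10
    · rw [if_pos (Nat.div_eq_of_lt h10)]
      rw [Nat.log_eq_zero_iff.mpr (Or.inl h10)]
      simp; omega
    · push_neg at h10
      have hne : ¬ n / 10 = 0 := by
        have := Nat.div_pos h10 (by norm_num)
        omega
      rw [if_neg hne]
      have hlt : n / 10 < f := by
        have := Nat.div_lt_self (by omega : 0 < n) (by norm_num : 1 < 10)
        omega
      rw [ih (n / 10) _ hlt]
      have hlog : Nat.log 10 (n / 10) = Nat.log 10 n - 1 := Nat.log_div_base 10 n
      have hlogpos : 0 < Nat.log 10 n := Nat.log_pos (by norm_num) h10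
      simp only [List.length_cons]
      omega

theorem len_str_pos (m : Int) (hm : 0 < m) :
    PySem.Str.len (PySem.Int.toStr m) = (Nat.log 10 m.toNat : Int) + 1 := by
  rw [PySem.Str.len_eq, PySem.Int.toList_toStr]
  unfold PySem.Int.toChars
  rw [if_neg (by omega)]
  unfold Nat.toDigits
  rw [toDigitsCore_len_exact (m.toNat + 1) m.toNat [] (Nat.lt_succ_self _)]
  simp

-- ===== VERDICT (by name: the statement is the Claim_ definition above) =====
theorem f_max_spec : Claim_equal_f_max := by
  intro T _
  unfold Spec_f_max f_max f_max_alt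
  cases T with
  | nil =>
    simp only [List.foldl_nil, PySem.List.maxD, PySem.List.max?, Option.getD]
    rw [show ((0 : Int)).toNat = 0 from rfl, digitLoop_zero]
    norm_num
  | cons x t =>
    rw [f_max_fold_is_max]
    simp only [PySem.List.maxD]
    rw [PySem.List.max?_id_cons]
    simp only [Option.getD_some]
    set m := t.foldl max x with hm
    have hM : (x :: t).foldl max 0 = max 0 m := by
      simp only [List.foldl_cons]
      rw [show max (0 : Int) x = max 0 x from rfl, foldl_max_pull, hm]
    rw [hM]
    by_cases hpos : 0 < m
    · rw [max_eq_right (le_of_lt hpos)]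
      rw [digitLoop_pos m.toNat 0 (by omega), if_pos hpos, len_str_pos m hpos]
      ring
    · push_neg at hpos
      rw [max_eq_left hpos, if_neg (by omega)]
      simp [digitLoop_zero]
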